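-- pv_equiv track=rewrite | github.com/manabcodes/bpmn2odrl | web-service-2/main.py | _branch_subgraph
-- ===== SOURCE A (Python) =====
-- from collections import defaultdict, deque
--
-- def _branch_subgraph(split_gw, branch_tgt, merge_gw, dag_succ):
--     fwd = set()
--     q = deque([branch_tgt])
--     while q:
--         v = q.popleft()
--         if v in fwd:
--             continue
--         fwd.add(v)
--         if v == merge_gw:
--             continue
--         for w in dag_succ.get(v, []):
--             q.append(w)
--     sub = {}
--     for v in fwd:
--         sub[v] = [w for w in dag_succ.get(v, []) if w in fwd]
--     return sub
-- ===== SOURCE B (Python) =====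
-- def _branch_subgraph(split_gw, branch_tgt, merge_gw, dag_succ):
--     # Round-based fixpoint saturation: repeatedly add all successors of the
--     # current set (cut at merge_gw) until nothing new appears.
--     fwd = {branch_tgt}
--     changed = True
--     while changed:
--         new = {w for v in fwd if v != merge_gw for w in dag_succ.get(v, [])}
--         changed = not (new <= fwd)
--         fwd |= new
--     return {v: [w for w in dag_succ.get(v, []) if w in fwd] for v in sorted(fwd)}
-- ===== Notes on version B (the rewrite author's own statement) =====
-- stated objective: alternative
-- what changed: A's node-at-a-time BFS with a deque worklist is replaced by a round-based fixpoint saturation: each pass recomputes the whole frontier as a set comprehension over the current reachable set and unions it in, stopping when a pass adds nothing; the reachable set (and hence the induced subgraph) is the same least fixpoint, independent of traversal strategy.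
import Mathlib
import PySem

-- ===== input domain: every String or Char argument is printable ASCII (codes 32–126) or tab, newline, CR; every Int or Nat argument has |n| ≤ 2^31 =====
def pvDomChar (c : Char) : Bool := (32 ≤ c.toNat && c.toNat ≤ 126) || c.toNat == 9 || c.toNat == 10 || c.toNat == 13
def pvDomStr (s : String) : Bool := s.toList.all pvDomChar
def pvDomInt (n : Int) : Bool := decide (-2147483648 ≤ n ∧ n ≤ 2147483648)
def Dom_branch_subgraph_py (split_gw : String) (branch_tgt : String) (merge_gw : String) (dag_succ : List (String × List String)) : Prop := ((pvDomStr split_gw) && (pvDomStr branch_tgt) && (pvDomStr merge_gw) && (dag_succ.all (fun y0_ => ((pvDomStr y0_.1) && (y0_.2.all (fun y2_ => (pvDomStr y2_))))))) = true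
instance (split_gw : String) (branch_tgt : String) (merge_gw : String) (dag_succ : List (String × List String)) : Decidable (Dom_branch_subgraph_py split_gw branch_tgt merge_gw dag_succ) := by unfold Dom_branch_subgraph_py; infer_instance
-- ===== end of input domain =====

-- B replaces A's node-at-a-time BFS worklist by a round-based fixpoint saturation (each pass
-- recomputes the frontier from the whole current set and unions it in, stopping when a pass adds
-- nothing). Both compute the same least fixpoint — the set reachable from branch_tgt cut at
-- merge_gw — so the induced subgraph is identical; Python's set/dict iteration order is
-- unspecified, both ports emit the result dict keyed in sorted order (dict outputs are compared
-- as mappings).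

-- ===== PORT A =====
-- dag_succ.get(v, []): first-match lookup in the association list
def pvSucc (dag : List (String × List String)) (v : String) : List String :=
  PySem.Dict.getD (PySem.Dict.mk dag) v []

-- candidate universe: branch target plus every successor in the map (used only for the fuel bounds)
def pvCand (branch_tgt : String) (dag : List (String × List String)) : List String :=
  PySem.List.dedup (branch_tgt :: dag.flatMap (fun p => p.2))

-- A's while-loop over the deque; fuel bounds the total number of pops (totality guard only)
def pvBfsA (merge : String) (dag : List (String × List String)) :
    Nat → List String → PySem.Set String → PySem.Set String
  | 0, _, fwd => fwd
  | _ + 1, [], fwd => fwd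
  | n + 1, v :: q, fwd =>
      if PySem.Set.contains fwd v then pvBfsA merge dag n q fwd
      else
        let fwd' := PySem.Set.add fwd v
        if v = merge then pvBfsA merge dag n q fwd'
        else pvBfsA merge dag n (q ++ pvSucc dag v) fwd'

def branch_subgraph_py (split_gw : String) (branch_tgt : String) (merge_gw : String)
    (dag_succ : List (String × List String)) : List (String × List String) :=
  let fuel := 1 + ((pvCand branch_tgt dag_succ).map (fun v => (pvSucc dag_succ v).length)).sum
  let fwd := pvBfsA merge_gw dag_succ fuel [branch_tgt] PySem.Set.empty
  -- 'for v in fwd' iterates a Python set (unspecified hash order): emitted here in sorted order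
  (PySem.List.sorted fwd (fun x => x) false).map
    (fun v => (v, (pvSucc dag_succ v).filter (fun w => PySem.Set.contains fwd w)))

-- ===== PORT B =====
-- dag_succ.get(v, []) on B's side, written as the first-match scan it denotes
def pvLook : List (String × List String) → String → List String
  | [], _ => []
  | (k, ws) :: rest, v => if k = v then ws else pvLook rest v

-- branch target plus every successor occurrence; its length bounds the number of passes
def pvUniv (branch_tgt : String) (dag : List (String × List String)) : List String :=
  branch_tgt :: dag.flatMap (fun p => p.2)

-- one pass: the set comprehension {w for v in fwd if v != merge for w in dag_succ.get(v, [])}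
def pvNew (merge : String) (dag : List (String × List String)) (fwd : PySem.Set String) :
    PySem.Set String :=
  fwd.foldl (fun acc v => if v = merge then acc else PySem.Set.update acc (pvLook dag v))
    PySem.Set.empty

-- B's while-changed loop; fuel bounds the number of passes (totality guard only)
def pvSat (merge : String) (dag : List (String × List String)) :
    Nat → PySem.Set String → PySem.Set String
  | 0, fwd => fwd
  | n + 1, fwd =>
      let nw := pvNew merge dag fwd
      let fwd' := PySem.Set.union fwd nw
      if PySem.Set.issubset nw fwd then fwd' else pvSat merge dag n fwd'

def branch_subgraph_py_alt (split_gw : String) (branch_tgt : String) (merge_gw : String)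
    (dag_succ : List (String × List String)) : List (String × List String) :=
  let fwd := pvSat merge_gw dag_succ (pvUniv branch_tgt dag_succ).length
    (PySem.Set.add PySem.Set.empty branch_tgt)
  (PySem.List.sorted fwd (fun x => x) false).map
    (fun v => (v, (pvLook dag_succ v).filter (fun w => PySem.Set.contains fwd w)))

-- ===== PRECONDITION & SPEC =====
def Spec_branch_subgraph_py (split_gw : String) (branch_tgt : String) (merge_gw : String) (dag_succ : List (String × List String)) (out : List (String × List String)) : Prop := out = branch_subgraph_py_alt split_gw branch_tgt merge_gw dag_succ
instance (split_gw : String) (branch_tgt : String) (merge_gw : String) (dag_succ : List (String × List String)) (out : List (String × List String)) : Decidable (Spec_branch_subgraph_py split_gw branch_tgt merge_gw dag_succ out) := by unfold Spec_branch_subgraph_py; infer_instance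

-- ===== CLAIM (what is proved, stated in full; the proofs are below) =====
def Claim_equal_branch_subgraph_py : Prop := ∀ (split_gw : String) (branch_tgt : String) (merge_gw : String) (dag_succ : List (String × List String)), Dom_branch_subgraph_py split_gw branch_tgt merge_gw dag_succ → Spec_branch_subgraph_py split_gw branch_tgt merge_gw dag_succ (branch_subgraph_py split_gw branch_tgt merge_gw dag_succ)

-- ===== LEMMAS AND PROOFS =====

-- potential of a BFS state: total successor mass of candidates not yet visited
def pvPot (dag : List (String × List String)) (C fwd : List String) : Nat :=
  ((C.filter (fun v => !PySem.Set.contains fwd v)).map (fun v => (pvSucc dag v).length)).sum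

-- reachability from u, cut off at the merge gateway
inductive pvReach (merge : String) (dag : List (String × List String)) : String → String → Prop
  | refl (v : String) : pvReach merge dag v v
  | step {u v w : String} : pvReach merge dag u v → v ≠ merge → w ∈ pvSucc dag v →
      pvReach merge dag u w

lemma pvContains_eq (s : List String) (x : String) :
    PySem.Set.contains s x = decide (x ∈ s) := by
  by_cases h : x ∈ s
  · simp only [h, decide_true]
    exact (PySem.Set.contains_iff s x).mpr h
  · simp only [h, decide_false]
    by_contra hc
    exact h ((PySem.Set.contains_iff s x).mp (by revert hc; cases PySem.Set.contains s x <;> simp))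

lemma pvSucc_subset_flat (dag : List (String × List String)) (v w : String)
    (h : w ∈ pvSucc dag v) : w ∈ dag.flatMap (fun p => p.2) := by
  induction dag with
  | nil => simp [pvSucc, PySem.Dict.getD, PySem.Dict.get?] at h
  | cons p rest ih =>
      rw [pvSucc, PySem.Dict.getD_eq_get?_getD, PySem.Dict.get?_mk_cons] at h
      split at h
      · simp at h
        simp [List.mem_flatMap]
        exact Or.inl h
      · rw [← PySem.Dict.getD_eq_get?_getD] at h
        simp [List.mem_flatMap] at ih ⊢
        rcases ih h with ⟨a, b, hab, hw⟩
        exact Or.inr ⟨a, b, hab, hw⟩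

lemma pvCand_nodup (t : String) (dag : List (String × List String)) : (pvCand t dag).Nodup :=
  PySem.List.nodup_dedup _

lemma pvCand_mem_self (t : String) (dag : List (String × List String)) : t ∈ pvCand t dag := by
  rw [pvCand, PySem.List.mem_dedup]; exact List.mem_cons_self ..

lemma pvCand_flat (t : String) (dag : List (String × List String)) (v w : String)
    (h : w ∈ pvSucc dag v) : w ∈ pvCand t dag := by
  rw [pvCand, PySem.List.mem_dedup]
  exact List.mem_cons_of_mem _ (pvSucc_subset_flat dag v w h)

-- visiting v removes exactly v from the unvisited filter
lemma pvFilter_append (C fwd : List String) (v : String) (hC : C.Nodup) :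
    C.filter (fun u => !PySem.Set.contains (fwd ++ [v]) u) =
      (C.filter (fun u => !PySem.Set.contains fwd u)).erase v := by
  rw [(hC.filter _).erase_eq_filter, List.filter_filter]
  apply List.filter_congr
  intro u _
  by_cases h : u = v <;> simp [h]

lemma pvMemFilter (C fwd : List String) (v : String) (hv : v ∈ C) (hc : v ∉ fwd) :
    v ∈ C.filter (fun u => !PySem.Set.contains fwd u) := by
  rw [List.mem_filter, pvContains_eq]
  simp [hv, hc]

lemma pvPot_add (dag : List (String × List String)) (C fwd : List String) (v : String)
    (hC : C.Nodup) (hv : v ∈ C) (hc : v ∉ fwd) :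
    pvPot dag C (fwd ++ [v]) + (pvSucc dag v).length = pvPot dag C fwd := by
  unfold pvPot
  rw [pvFilter_append C fwd v hC]
  have hperm := List.perm_cons_erase (pvMemFilter C fwd v hv hc)
  have := ((hperm.map (fun v => (pvSucc dag v).length)).sum_eq)
  simp only [List.map_cons, List.sum_cons] at this
  omega

-- ---- A's BFS loop ----

-- everything A collects is reachable
lemma pvBfsA_sound (m : String) (dag : List (String × List String)) (P : String → Prop)
    (hP : ∀ v w, P v → v ≠ m → w ∈ pvSucc dag v → P w) :
    ∀ (n : Nat) (q fwd : List String), (∀ x ∈ q, P x) → (∀ x ∈ fwd, P x) →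
      ∀ x ∈ pvBfsA m dag n q fwd, P x := by
  intro n
  induction n with
  | zero => intro q fwd _ hf x hx; exact hf x hx
  | succ n ih =>
      intro q fwd hq hf x hx
      match q with
      | [] => exact hf x hx
      | v :: q' =>
          rw [pvBfsA] at hx
          by_cases hc : PySem.Set.contains fwd v
          · rw [if_pos hc] at hx
            exact ih q' fwd (fun y hy => hq y (List.mem_cons_of_mem _ hy)) hf x hx
          · rw [if_neg hc] at hx
            simp only at hx
            have hvn : v ∉ fwd := fun h => hc ((PySem.Set.contains_iff fwd v).mpr h)
            rw [PySem.Set.add_of_not_mem hvn] at hx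
            have hPv : P v := hq v (List.mem_cons_self ..)
            have hf' : ∀ y ∈ fwd ++ [v], P y := by
              intro y hy
              rcases List.mem_append.mp hy with h | h
              · exact hf y h
              · simpa using (List.mem_singleton.mp h) ▸ hPv
            by_cases hm : v = m
            · rw [if_pos hm] at hx
              exact ih q' _ (fun y hy => hq y (List.mem_cons_of_mem _ hy)) hf' x hx
            · rw [if_neg hm] at hx
              refine ih _ _ ?_ hf' x hx
              intro y hy
              rcases List.mem_append.mp hy with h | h
              · exact hq y (List.mem_cons_of_mem _ h)
              · exact hP v y hPv hm h

-- with enough fuel, A's loop drains the queue and the result is successor-closed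
lemma pvBfsA_spec (m : String) (dag : List (String × List String)) (C : List String)
    (hCnd : C.Nodup) (hflat : ∀ v w, w ∈ pvSucc dag v → w ∈ C) :
    ∀ (n : Nat) (q fwd : List String),
      (∀ x ∈ q, x ∈ C) → (∀ x ∈ fwd, x ∈ C) → fwd.Nodup →
      (∀ v ∈ fwd, v ≠ m → ∀ w ∈ pvSucc dag v, w ∈ fwd ∨ w ∈ q) →
      q.length + pvPot dag C fwd ≤ n →
      (∀ x ∈ fwd, x ∈ pvBfsA m dag n q fwd) ∧ (∀ x ∈ q, x ∈ pvBfsA m dag n q fwd) ∧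
      (pvBfsA m dag n q fwd).Nodup ∧
      (∀ v ∈ pvBfsA m dag n q fwd, v ≠ m → ∀ w ∈ pvSucc dag v, w ∈ pvBfsA m dag n q fwd) := by
  intro n
  induction n with
  | zero =>
      intro q fwd hq hf hnd hcl hfuel
      have hq0 : q = [] := List.eq_nil_of_length_eq_zero (by omega)
      subst hq0
      rw [pvBfsA]
      refine ⟨fun x hx => hx, by simp, hnd, ?_⟩
      intro v hv hm w hw
      rcases hcl v hv hm w hw with h | h
      · exact h
      · simp at h
  | succ n ih =>
      intro q fwd hq hf hnd hcl hfuel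
      match q with
      | [] =>
          rw [pvBfsA]
          refine ⟨fun x hx => hx, by simp, hnd, ?_⟩
          intro v hv hm w hw
          rcases hcl v hv hm w hw with h | h
          · exact h
          · simp at h
      | v :: q' =>
          rw [pvBfsA]
          have hvC : v ∈ C := hq v (List.mem_cons_self ..)
          by_cases hc : PySem.Set.contains fwd v
          · rw [if_pos hc]
            have hvf : v ∈ fwd := (PySem.Set.contains_iff fwd v).mp hc
            have hcl' : ∀ u ∈ fwd, u ≠ m → ∀ w ∈ pvSucc dag u, w ∈ fwd ∨ w ∈ q' := by
              intro u hu hm w hw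
              rcases hcl u hu hm w hw with h | h
              · exact Or.inl h
              · rcases List.mem_cons.mp h with rfl | h
                · exact Or.inl hvf
                · exact Or.inr h
            have hres := ih q' fwd (fun y hy => hq y (List.mem_cons_of_mem _ hy)) hf hnd hcl'
              (by simp at hfuel ⊢; omega)
            exact ⟨hres.1, fun x hx => by
              rcases List.mem_cons.mp hx with rfl | hx
              · exact hres.1 x hvf
              · exact hres.2.1 x hx, hres.2.2⟩
          · rw [if_neg hc]
            simp only
            have hvn : v ∉ fwd := fun h => hc ((PySem.Set.contains_iff fwd v).mpr h)
            rw [PySem.Set.add_of_not_mem hvn]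
            have hpot := pvPot_add dag C fwd v hCnd hvC hvn
            have hf' : ∀ x ∈ fwd ++ [v], x ∈ C := by
              intro x hx
              rcases List.mem_append.mp hx with h | h
              · exact hf x h
              · exact (List.mem_singleton.mp h) ▸ hvC
            have hnd' : (fwd ++ [v]).Nodup := by
              simp [List.nodup_append, hnd]
              intro a ha hav
              exact hvn (hav ▸ ha)
            have hmemf' : ∀ x, x ∈ fwd ++ [v] ↔ (x ∈ fwd ∨ x = v) := by
              intro x; simp [List.mem_append]
            by_cases hm : v = m
            · rw [if_pos hm]
              have hcl' : ∀ u ∈ fwd ++ [v], u ≠ m → ∀ w ∈ pvSucc dag u,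
                  w ∈ fwd ++ [v] ∨ w ∈ q' := by
                intro u hu hum w hw
                rcases (hmemf' u).mp hu with h | rfl
                · rcases hcl u h hum w hw with h2 | h2
                  · exact Or.inl ((hmemf' w).mpr (Or.inl h2))
                  · rcases List.mem_cons.mp h2 with rfl | h2
                    · exact Or.inl ((hmemf' w).mpr (Or.inr rfl))
                    · exact Or.inr h2
                · exact absurd hm hum
              have hres := ih q' (fwd ++ [v]) (fun y hy => hq y (List.mem_cons_of_mem _ hy))
                hf' hnd' hcl' (by simp at hfuel ⊢; omega)
              refine ⟨fun x hx => hres.1 x ((hmemf' x).mpr (Or.inl hx)), ?_, hres.2.2⟩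
              intro x hx
              rcases List.mem_cons.mp hx with rfl | hx
              · exact hres.1 x ((hmemf' x).mpr (Or.inr rfl))
              · exact hres.2.1 x hx
            · rw [if_neg hm]
              have hq'' : ∀ x ∈ q' ++ pvSucc dag v, x ∈ C := by
                intro x hx
                rcases List.mem_append.mp hx with h | h
                · exact hq x (List.mem_cons_of_mem _ h)
                · exact hflat v x h
              have hcl' : ∀ u ∈ fwd ++ [v], u ≠ m → ∀ w ∈ pvSucc dag u,
                  w ∈ fwd ++ [v] ∨ w ∈ q' ++ pvSucc dag v := by
                intro u hu hum w hw
                rcases (hmemf' u).mp hu with h | rfl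
                · rcases hcl u h hum w hw with h2 | h2
                  · exact Or.inl ((hmemf' w).mpr (Or.inl h2))
                  · rcases List.mem_cons.mp h2 with rfl | h2
                    · exact Or.inl ((hmemf' w).mpr (Or.inr rfl))
                    · exact Or.inr (List.mem_append.mpr (Or.inl h2))
                · exact Or.inr (List.mem_append.mpr (Or.inr hw))
              have hres := ih (q' ++ pvSucc dag v) (fwd ++ [v]) hq'' hf' hnd' hcl'
                (by simp at hfuel ⊢; omega)
              refine ⟨fun x hx => hres.1 x ((hmemf' x).mpr (Or.inl hx)), ?_, hres.2.2⟩
              intro x hx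
              rcases List.mem_cons.mp hx with rfl | hx
              · exact hres.1 x ((hmemf' x).mpr (Or.inr rfl))
              · exact hres.2.1 x (List.mem_append.mpr (Or.inl hx))

-- ---- B's saturation loop ----

-- B's association-list scan agrees with A's dict lookup
lemma pvLook_eq (dag : List (String × List String)) (v : String) :
    pvLook dag v = pvSucc dag v := by
  induction dag with
  | nil => simp [pvLook, pvSucc, PySem.Dict.getD, PySem.Dict.get?]
  | cons p rest ih =>
      rw [pvSucc, PySem.Dict.getD_eq_get?_getD, PySem.Dict.get?_mk_cons]
      obtain ⟨k, ws⟩ := p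
      by_cases h : k = v
      · simp [pvLook, h]
      · simp only [pvLook, if_neg h, ih, pvSucc, PySem.Dict.getD_eq_get?_getD]
        simp [h]

-- membership in one pass's frontier
lemma pvMem_pvNew (m : String) (dag : List (String × List String)) (fwd : List String)
    (x : String) :
    x ∈ pvNew m dag fwd ↔ ∃ v ∈ fwd, v ≠ m ∧ x ∈ pvLook dag v := by
  unfold pvNew
  have hgen : ∀ (l acc : List String),
      (x ∈ l.foldl (fun acc v => if v = m then acc else PySem.Set.update acc (pvLook dag v)) acc ↔
        x ∈ acc ∨ ∃ v ∈ l, v ≠ m ∧ x ∈ pvLook dag v) := by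
    intro l
    induction l with
    | nil => simp
    | cons v l ihl =>
        intro acc
        simp only [List.foldl_cons]
        by_cases hm : v = m
        · rw [if_pos hm, ihl]
          constructor
          · rintro (h | ⟨u, hu, hum, hx⟩)
            · exact Or.inl h
            · exact Or.inr ⟨u, List.mem_cons_of_mem _ hu, hum, hx⟩
          · rintro (h | ⟨u, hu, hum, hx⟩)
            · exact Or.inl h
            · rcases List.mem_cons.mp hu with rfl | hu
              · exact absurd hm hum
              · exact Or.inr ⟨u, hu, hum, hx⟩
        · rw [if_neg hm, ihl]
          constructor
          · rintro (h | ⟨u, hu, hum, hx⟩)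
            · rcases (PySem.Set.mem_update _ _ _).mp h with h | h
              · exact Or.inl h
              · exact Or.inr ⟨v, List.mem_cons_self .., hm, h⟩
            · exact Or.inr ⟨u, List.mem_cons_of_mem _ hu, hum, hx⟩
          · rintro (h | ⟨u, hu, hum, hx⟩)
            · exact Or.inl ((PySem.Set.mem_update _ _ _).mpr (Or.inl h))
            · rcases List.mem_cons.mp hu with rfl | hu
              · exact Or.inl ((PySem.Set.mem_update _ _ _).mpr (Or.inr hx))
              · exact Or.inr ⟨u, hu, hum, hx⟩
  rw [hgen]
  simp [PySem.Set.empty]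

-- a Nodup list included in another is no longer than it
lemma pvNodup_len_le (l l' : List String) (h : l.Nodup) (hs : ∀ x ∈ l, x ∈ l') :
    l.length ≤ l'.length := by
  classical
  calc l.length = l.toFinset.card := (List.toFinset_card_of_nodup h).symm
    _ ≤ l'.toFinset.card := Finset.card_le_card (fun a ha => by
        simp only [List.mem_toFinset] at ha ⊢; exact hs a ha)
    _ ≤ l'.length := l'.toFinset_card_le

-- everything B collects is reachable
lemma pvSat_sound (m : String) (dag : List (String × List String)) (P : String → Prop)
    (hP : ∀ v w, P v → v ≠ m → w ∈ pvSucc dag v → P w) :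
    ∀ (n : Nat) (fwd : List String), (∀ x ∈ fwd, P x) → ∀ x ∈ pvSat m dag n fwd, P x := by
  intro n
  induction n with
  | zero => intro fwd hf x hx; exact hf x hx
  | succ n ih =>
      intro fwd hf x hx
      rw [pvSat] at hx
      have hf' : ∀ y ∈ PySem.Set.union fwd (pvNew m dag fwd), P y := by
        intro y hy
        rcases (PySem.Set.mem_union _ _ _).mp hy with h | h
        · exact hf y h
        · obtain ⟨v, hv, hvm, hyv⟩ := (pvMem_pvNew m dag fwd y).mp h
          exact hP v y (hf v hv) hvm (by rwa [pvLook_eq] at hyv)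
      by_cases hs : PySem.Set.issubset (pvNew m dag fwd) fwd
      · rw [if_pos hs] at hx; exact hf' x hx
      · rw [if_neg hs] at hx; exact ih _ hf' x hx

-- with enough fuel, B reaches the fixpoint: result ⊇ fwd, Nodup, ⊆ universe, successor-closed
lemma pvSat_spec (m t : String) (dag : List (String × List String)) :
    ∀ (n : Nat) (fwd : List String), fwd.Nodup → (∀ x ∈ fwd, x ∈ pvUniv t dag) →
      (PySem.List.dedup (pvUniv t dag)).length < fwd.length + n →
      (∀ x ∈ fwd, x ∈ pvSat m dag n fwd) ∧ (pvSat m dag n fwd).Nodup ∧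
      (∀ v ∈ pvSat m dag n fwd, v ≠ m → ∀ w ∈ pvLook dag v, w ∈ pvSat m dag n fwd) := by
  intro n
  induction n with
  | zero =>
      intro fwd hnd hsub hfuel
      have : fwd.length ≤ (PySem.List.dedup (pvUniv t dag)).length :=
        pvNodup_len_le fwd _ hnd (fun x hx => (PySem.List.mem_dedup ..).mpr (hsub x hx))
      omega
  | succ n ih =>
      intro fwd hnd hsub hfuel
      rw [pvSat]
      have hnwU : ∀ x ∈ pvNew m dag fwd, x ∈ pvUniv t dag := by
        intro x hx
        obtain ⟨v, _, _, hxv⟩ := (pvMem_pvNew m dag fwd x).mp hx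
        rw [pvLook_eq] at hxv
        exact List.mem_cons_of_mem _ (pvSucc_subset_flat dag v x hxv)
      have hmemU : ∀ x, x ∈ PySem.Set.union fwd (pvNew m dag fwd) ↔
          (x ∈ fwd ∨ x ∈ pvNew m dag fwd) := fun x => PySem.Set.mem_union ..
      have hndU : (PySem.Set.union fwd (pvNew m dag fwd) : List String).Nodup :=
        PySem.Set.nodup_union _ _ hnd
      have hsubU : ∀ x ∈ PySem.Set.union fwd (pvNew m dag fwd), x ∈ pvUniv t dag := by
        intro x hx
        rcases (hmemU x).mp hx with h | h
        · exact hsub x h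
        · exact hnwU x h
      by_cases hs : PySem.Set.issubset (pvNew m dag fwd) fwd
      · rw [if_pos hs]
        have hni : ∀ x ∈ pvNew m dag fwd, x ∈ fwd := fun x hx =>
          (PySem.Set.issubset_iff ..).mp hs x hx
        refine ⟨fun x hx => (hmemU x).mpr (Or.inl hx), hndU, ?_⟩
        intro v hv hvm w hw
        have hvf : v ∈ fwd := by
          rcases (hmemU v).mp hv with h | h
          · exact h
          · exact hni v h
        exact (hmemU w).mpr (Or.inl (hni w ((pvMem_pvNew m dag fwd w).mpr ⟨v, hvf, hvm, hw⟩)))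
      · rw [if_neg hs]
        obtain ⟨x, hxn, hxf⟩ : ∃ x ∈ pvNew m dag fwd, x ∉ fwd := by
          by_contra hall
          push Not at hall
          exact hs ((PySem.Set.issubset_iff ..).mpr hall)
        have hlen : fwd.length + 1 ≤ (PySem.Set.union fwd (pvNew m dag fwd)).length := by
          have : (fwd ++ [x]).Nodup := by
            simp [List.nodup_append, hnd]
            intro a ha hax
            exact hxf (hax ▸ ha)
          have hle := pvNodup_len_le (fwd ++ [x]) (PySem.Set.union fwd (pvNew m dag fwd)) this
            (by
              intro y hy
              rcases List.mem_append.mp hy with h | h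
              · exact (hmemU y).mpr (Or.inl h)
              · exact (hmemU y).mpr (Or.inr ((List.mem_singleton.mp h) ▸ hxn)))
          simpa using hle
        have hres := ih (PySem.Set.union fwd (pvNew m dag fwd)) hndU hsubU (by omega)
        exact ⟨fun y hy => hres.1 y ((hmemU y).mpr (Or.inl hy)), hres.2.1, hres.2.2⟩

-- ---- both traversals compute exactly the reachable set ----

lemma pvBfs_props (t m : String) (dag : List (String × List String)) :
    (∀ x, x ∈ pvBfsA m dag (1 + ((pvCand t dag).map (fun v => (pvSucc dag v).length)).sum)
        [t] PySem.Set.empty ↔ pvReach m dag t x) ∧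
    (pvBfsA m dag (1 + ((pvCand t dag).map (fun v => (pvSucc dag v).length)).sum)
        [t] PySem.Set.empty).Nodup := by
  have hpot : pvPot dag (pvCand t dag) PySem.Set.empty =
      ((pvCand t dag).map (fun v => (pvSucc dag v).length)).sum := by
    unfold pvPot
    congr 1
    rw [List.filter_eq_self.mpr]
    intro u _
    simp [PySem.Set.empty]
  have hspec := pvBfsA_spec m dag (pvCand t dag) (pvCand_nodup t dag) (pvCand_flat t dag)
    (1 + ((pvCand t dag).map (fun v => (pvSucc dag v).length)).sum) [t] PySem.Set.empty
    (by intro x hx; rw [List.mem_singleton.mp hx]; exact pvCand_mem_self t dag)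
    (by intro x hx; simp [PySem.Set.empty] at hx)
    (by simp [PySem.Set.empty])
    (by intro v hv; simp [PySem.Set.empty] at hv)
    (by rw [hpot]; simp)
  constructor
  · intro x
    constructor
    · exact fun hx => pvBfsA_sound m dag (pvReach m dag t)
        (fun v w hv hm hw => pvReach.step hv hm hw) _ [t] PySem.Set.empty
        (by intro y hy; rw [List.mem_singleton.mp hy]; exact pvReach.refl t)
        (by intro y hy; simp [PySem.Set.empty] at hy) x hx
    · intro hr
      induction hr with
      | refl => exact hspec.2.1 _ (List.mem_singleton.mpr rfl)
      | step huv hm hw ihr => exact hspec.2.2.2 _ ihr hm _ hw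
  · exact hspec.2.2.1

lemma pvSat_props (t m : String) (dag : List (String × List String)) :
    (∀ x, x ∈ pvSat m dag (pvUniv t dag).length (PySem.Set.add PySem.Set.empty t) ↔
      pvReach m dag t x) ∧
    (pvSat m dag (pvUniv t dag).length (PySem.Set.add PySem.Set.empty t)).Nodup := by
  have hstart : (PySem.Set.add PySem.Set.empty t : List String) = [t] := by
    simp [PySem.Set.empty, PySem.Set.add_of_not_mem]
  have hdlen : (PySem.List.dedup (pvUniv t dag)).length ≤ (pvUniv t dag).length := by
    rw [PySem.List.dedup_eq_ofList]
    exact PySem.Set.length_ofList_le _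
  have hspec := pvSat_spec m t dag (pvUniv t dag).length [t]
    (by simp)
    (by intro x hx; rw [List.mem_singleton.mp hx]; exact List.mem_cons_self ..)
    (by simp only [List.length_singleton]; omega)
  rw [hstart]
  constructor
  · intro x
    constructor
    · exact fun hx => pvSat_sound m dag (pvReach m dag t)
        (fun v w hv hm hw => pvReach.step hv hm hw) _ [t]
        (by intro y hy; rw [List.mem_singleton.mp hy]; exact pvReach.refl t) x hx
    · intro hr
      induction hr with
      | refl => exact hspec.1 _ (List.mem_singleton.mpr rfl)
      | step huv hm hw ihr => exact hspec.2.2 _ ihr hm _ (by rwa [pvLook_eq])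
  · exact hspec.2.1

-- ===== VERDICT (by name: the statement is the Claim_ definition above) =====
theorem branch_subgraph_py_spec : Claim_equal_branch_subgraph_py := by
  intro split_gw t m dag _
  unfold Spec_branch_subgraph_py branch_subgraph_py branch_subgraph_py_alt
  simp only
  have hb := pvBfs_props t m dag
  have hd := pvSat_props t m dag
  set S := pvBfsA m dag (1 + ((pvCand t dag).map (fun v => (pvSucc dag v).length)).sum)
      [t] PySem.Set.empty with hS
  set T := pvSat m dag (pvUniv t dag).length (PySem.Set.add PySem.Set.empty t) with hT
  have hmem : ∀ x, x ∈ S ↔ x ∈ T := fun x => (hb.1 x).trans (hd.1 x).symm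
  have hperm : (PySem.List.sorted T (fun x => x) false).Perm S :=
    (PySem.List.sorted_perm ..).trans
      (((List.perm_ext_iff_of_nodup hd.2 hb.2).mpr (fun a => (hmem a).symm)))
  have hsorted_nodup : (PySem.List.sorted T (fun x => x) false).Nodup :=
    (PySem.List.sorted_perm ..).nodup_iff.mpr hd.2
  have hpw_le : (PySem.List.sorted T (fun x => x) false).Pairwise
      (fun a b : String => a ≤ b) := PySem.List.sorted_pairwise ..
  have hpw_lt : (PySem.List.sorted T (fun x => x) false).Pairwise
      (fun a b : String => a < b) := by
    have := hpw_le.and hsorted_nodup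
    exact this.imp (fun {a b} h => lt_of_le_of_ne h.1 h.2)
  have heq : PySem.List.sorted S (fun x => x) false = PySem.List.sorted T (fun x => x) false :=
    PySem.List.sorted_eq_of_perm_of_pairwise_lt S (PySem.List.sorted T (fun x => x) false)
      (fun x => x) hperm hpw_lt
  rw [heq]
  apply List.map_congr_left
  intro v _
  refine Prod.ext rfl ?_
  rw [pvLook_eq]
  apply List.filter_congr
  intro w _
  simp only [pvContains_eq]
  exact decide_eq_decide.mpr (hmem w)
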